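-- pv_equiv track=rewrite | github.com/abby-mi11er/edith-m2 | electron/extraResources/edith_backend/server/connectors_full.py | format_refworks_export
-- ===== SOURCE A (Python) =====
-- def format_refworks_export(sources: list[dict]) -> str:
--     """Format sources as RefWorks Tagged Format (.txt).
--
--     RefWorks uses a tagged format similar to RIS but with different tags.
--     """
--     lines = []
--     for s in sources:
--         lines.append("RT Journal Article")
--         if s.get("title"):
--             lines.append(f"T1 {s['title']}")
--         if s.get("authors"):
--             for author in s["authors"].split(","):
--                 author = author.strip()
--                 if author:
--                     lines.append(f"A1 {author}")
--         elif s.get("author"):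
--             lines.append(f"A1 {s['author']}")
--         if s.get("year"):
--             lines.append(f"YR {s['year']}")
--         if s.get("journal") or s.get("venue"):
--             lines.append(f"JF {s.get('journal') or s.get('venue')}")
--         if s.get("doi"):
--             lines.append(f"DO {s['doi']}")
--         if s.get("url"):
--             lines.append(f"UL {s['url']}")
--         if s.get("abstract"):
--             lines.append(f"AB {s['abstract'][:1000]}")
--         if s.get("volume"):
--             lines.append(f"VO {s['volume']}")
--         if s.get("pages"):
--             lines.append(f"SP {s['pages']}")
--         lines.append("ER")
--         lines.append("")
--
--     return "\n".join(lines)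
-- ===== SOURCE B (Python) =====
-- def _fields(s):
--     """Every candidate (tag, value) pair for one record, in output order.
--
--     Falsy values are dropped later, at render time, so no per-field if-tests
--     are needed here except the authors/author alternative.
--     """
--     yield "T1", s.get("title", "")
--     if s.get("authors"):
--         for a in s["authors"].split(","):
--             yield "A1", a.strip()
--     else:
--         yield "A1", s.get("author", "")
--     yield "YR", s.get("year", "")
--     yield "JF", s.get("journal") or s.get("venue") or ""
--     yield "DO", s.get("doi", "")
--     yield "UL", s.get("url", "")
--     yield "AB", (s.get("abstract") or "")[:1000]
--     yield "VO", s.get("volume", "")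
--     yield "SP", s.get("pages", "")
--
--
-- def _record(s):
--     return "\n".join(["RT Journal Article",
--                       *(f"{t} {v}" for t, v in _fields(s) if v),
--                       "ER"])
--
--
-- def format_refworks_export(sources: list[dict]) -> str:
--     return "\n\n".join(map(_record, sources)) + "\n" if sources else ""
-- ===== Notes on version B (the rewrite author's own statement) =====
-- stated objective: idiomatic
-- what changed: B replaces A's chain of per-field if-tests appending into one flat lines list by a generate-then-filter design: a generator yields every candidate (tag, value) pair with falsy fallbacks ('' defaults, or-chains, unconditional abstract slice), a single truthiness filter drops empty values at render time, and records are rendered individually and joined with '\n\n' plus one trailing newline instead of join over a flat list containing the blank separator lines.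
import Mathlib
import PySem

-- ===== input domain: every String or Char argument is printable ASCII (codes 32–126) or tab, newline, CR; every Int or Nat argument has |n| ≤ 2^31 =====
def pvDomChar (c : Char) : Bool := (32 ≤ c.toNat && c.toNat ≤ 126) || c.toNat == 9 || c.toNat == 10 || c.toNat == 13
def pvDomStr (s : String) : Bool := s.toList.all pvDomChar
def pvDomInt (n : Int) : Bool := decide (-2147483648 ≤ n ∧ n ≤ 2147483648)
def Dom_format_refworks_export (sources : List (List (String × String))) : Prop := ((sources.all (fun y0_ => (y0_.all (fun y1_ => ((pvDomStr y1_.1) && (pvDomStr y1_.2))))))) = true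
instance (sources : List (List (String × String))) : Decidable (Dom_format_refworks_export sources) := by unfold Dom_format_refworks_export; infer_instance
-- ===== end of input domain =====

-- B generates every candidate (tag, value) pair per record with falsy fallbacks and filters
-- at render time, joining whole records with "\n\n" plus a trailing newline, instead of A's
-- if-chain appending to one flat line list (objective: idiomatic; return value only).

-- shared dict primitive: s.get(k) on an insertion-ordered assoc list (first match)
def pvGet (s : List (String × String)) (k : String) : Option String :=
  (s.find? (fun p => p.1 == k)).map (·.2)

-- Python truthiness of an optional string: present and non-empty
def pvTruthy (o : Option String) : Bool := !((o.getD "") == "")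

-- s.split(",")  (sep non-empty, so split? is always `some`)
def pvSplitComma (s : String) : List String := (PySem.Str.split? s ",").getD []

-- ===== PORT A =====
def format_refworks_export (sources : List (List (String × String))) : String :=
  let lines : List String := sources.foldl (fun lines s =>
    let lines := lines ++ ["RT Journal Article"]
    let lines := if pvTruthy (pvGet s "title") then lines ++ ["T1 " ++ (pvGet s "title").getD ""] else lines
    let lines :=
      if pvTruthy (pvGet s "authors") then
        (pvSplitComma ((pvGet s "authors").getD "")).foldl (fun lines author =>
          if pvTruthy (some (PySem.Str.strip author)) then lines ++ ["A1 " ++ PySem.Str.strip author] else lines) lines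
      else if pvTruthy (pvGet s "author") then lines ++ ["A1 " ++ (pvGet s "author").getD ""] else lines
    let lines := if pvTruthy (pvGet s "year") then lines ++ ["YR " ++ (pvGet s "year").getD ""] else lines
    let lines :=
      if pvTruthy (pvGet s "journal") || pvTruthy (pvGet s "venue") then
        lines ++ ["JF " ++ (if pvTruthy (pvGet s "journal") then pvGet s "journal" else pvGet s "venue").getD ""]
      else lines
    let lines := if pvTruthy (pvGet s "doi") then lines ++ ["DO " ++ (pvGet s "doi").getD ""] else lines
    let lines := if pvTruthy (pvGet s "url") then lines ++ ["UL " ++ (pvGet s "url").getD ""] else lines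
    let lines := if pvTruthy (pvGet s "abstract") then lines ++ ["AB " ++ PySem.Str.slice ((pvGet s "abstract").getD "") none (some 1000)] else lines
    let lines := if pvTruthy (pvGet s "volume") then lines ++ ["VO " ++ (pvGet s "volume").getD ""] else lines
    let lines := if pvTruthy (pvGet s "pages") then lines ++ ["SP " ++ (pvGet s "pages").getD ""] else lines
    lines ++ ["ER", ""]) []
  PySem.Str.join "\n" lines

-- ===== PORT B =====
-- _fields: every candidate (tag, value) pair, with falsy fallbacks; filtered at render time
def pvFields (s : List (String × String)) : List (String × String) :=
  [("T1", (pvGet s "title").getD "")]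
  ++ (if pvTruthy (pvGet s "authors") then
        (pvSplitComma ((pvGet s "authors").getD "")).map (fun a => ("A1", PySem.Str.strip a))
      else [("A1", (pvGet s "author").getD "")])
  ++ [("YR", (pvGet s "year").getD "")]
  ++ [("JF", (if pvTruthy (pvGet s "journal") then pvGet s "journal" else pvGet s "venue").getD "")]
  ++ [("DO", (pvGet s "doi").getD "")]
  ++ [("UL", (pvGet s "url").getD "")]
  ++ [("AB", PySem.Str.slice ((pvGet s "abstract").getD "") none (some 1000))]
  ++ [("VO", (pvGet s "volume").getD "")]
  ++ [("SP", (pvGet s "pages").getD "")]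

-- _record: "\n".join of header, truthy rendered fields, and "ER"
def pvRecord (s : List (String × String)) : String :=
  PySem.Str.join "\n"
    (["RT Journal Article"]
     ++ ((pvFields s).filter (fun p => !(p.2 == ""))).map (fun p => p.1 ++ " " ++ p.2)
     ++ ["ER"])

def format_refworks_export_alt (sources : List (List (String × String))) : String :=
  if sources.isEmpty then ""
  else PySem.Str.join "\n\n" (sources.map pvRecord) ++ "\n"

-- ===== PRECONDITION & SPEC =====
def Spec_format_refworks_export (sources : List (List (String × String))) (out : String) : Prop := out = format_refworks_export_alt sources
instance (sources : List (List (String × String))) (out : String) : Decidable (Spec_format_refworks_export sources out) := by unfold Spec_format_refworks_export; infer_instance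

-- ===== CLAIM (what is proved, stated in full; the proofs are below) =====
def Claim_equal_format_refworks_export : Prop := ∀ (sources : List (List (String × String))), Dom_format_refworks_export sources → Spec_format_refworks_export sources (format_refworks_export sources)

-- ===== LEMMAS AND PROOFS =====

-- the lines of one record, as B renders them (pvRecord s = join "\n" (pvBLines s))
def pvBLines (s : List (String × String)) : List String :=
  ["RT Journal Article"]
  ++ ((pvFields s).filter (fun p => !(p.2 == ""))).map (fun p => p.1 ++ " " ++ p.2)
  ++ ["ER"]

-- the lines one iteration of A's loop appends, in appended-if normal form
def pvALines (s : List (String × String)) : List String :=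
  ["RT Journal Article"]
  ++ (if pvTruthy (pvGet s "title") then ["T1 " ++ (pvGet s "title").getD ""] else [])
  ++ (if pvTruthy (pvGet s "authors") then
        ((pvSplitComma ((pvGet s "authors").getD "")).filter
            (fun a => pvTruthy (some (PySem.Str.strip a)))).map (fun a => "A1 " ++ PySem.Str.strip a)
      else if pvTruthy (pvGet s "author") then ["A1 " ++ (pvGet s "author").getD ""] else [])
  ++ (if pvTruthy (pvGet s "year") then ["YR " ++ (pvGet s "year").getD ""] else [])
  ++ (if pvTruthy (pvGet s "journal") || pvTruthy (pvGet s "venue") then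
        ["JF " ++ (if pvTruthy (pvGet s "journal") then pvGet s "journal" else pvGet s "venue").getD ""] else [])
  ++ (if pvTruthy (pvGet s "doi") then ["DO " ++ (pvGet s "doi").getD ""] else [])
  ++ (if pvTruthy (pvGet s "url") then ["UL " ++ (pvGet s "url").getD ""] else [])
  ++ (if pvTruthy (pvGet s "abstract") then ["AB " ++ PySem.Str.slice ((pvGet s "abstract").getD "") none (some 1000)] else [])
  ++ (if pvTruthy (pvGet s "volume") then ["VO " ++ (pvGet s "volume").getD ""] else [])
  ++ (if pvTruthy (pvGet s "pages") then ["SP " ++ (pvGet s "pages").getD ""] else [])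
  ++ ["ER", ""]

-- append-normalisation helpers
theorem pv_if_append (c : Bool) (x l : List String) :
    (if c then x ++ l else x) = x ++ (if c then l else []) := by cases c <;> simp

theorem pv_if_append₂ {α : Type} (c : Bool) (x : List α) (a b : List α) :
    (if c then x ++ a else x ++ b) = x ++ (if c then a else b) := by cases c <;> rfl

-- one loop iteration of A appends exactly pvALines s
theorem pvBody_eq (acc : List String) (s : List (String × String)) :
    (let lines := acc ++ ["RT Journal Article"]
     let lines := if pvTruthy (pvGet s "title") then lines ++ ["T1 " ++ (pvGet s "title").getD ""] else lines
     let lines :=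
       if pvTruthy (pvGet s "authors") then
         (pvSplitComma ((pvGet s "authors").getD "")).foldl (fun lines author =>
           if pvTruthy (some (PySem.Str.strip author)) then lines ++ ["A1 " ++ PySem.Str.strip author] else lines) lines
       else if pvTruthy (pvGet s "author") then lines ++ ["A1 " ++ (pvGet s "author").getD ""] else lines
     let lines := if pvTruthy (pvGet s "year") then lines ++ ["YR " ++ (pvGet s "year").getD ""] else lines
     let lines :=
       if pvTruthy (pvGet s "journal") || pvTruthy (pvGet s "venue") then
         lines ++ ["JF " ++ (if pvTruthy (pvGet s "journal") then pvGet s "journal" else pvGet s "venue").getD ""]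
       else lines
     let lines := if pvTruthy (pvGet s "doi") then lines ++ ["DO " ++ (pvGet s "doi").getD ""] else lines
     let lines := if pvTruthy (pvGet s "url") then lines ++ ["UL " ++ (pvGet s "url").getD ""] else lines
     let lines := if pvTruthy (pvGet s "abstract") then lines ++ ["AB " ++ PySem.Str.slice ((pvGet s "abstract").getD "") none (some 1000)] else lines
     let lines := if pvTruthy (pvGet s "volume") then lines ++ ["VO " ++ (pvGet s "volume").getD ""] else lines
     let lines := if pvTruthy (pvGet s "pages") then lines ++ ["SP " ++ (pvGet s "pages").getD ""] else lines
     lines ++ ["ER", ""]) = acc ++ pvALines s := by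
  simp only [PySem.List.foldl_append_if]
  simp only [pv_if_append, pv_if_append₂, pvALines, List.append_assoc]

theorem pvLines_eq (sources : List (List (String × String))) (acc : List String) :
    (sources.foldl (fun lines s =>
      let lines := lines ++ ["RT Journal Article"]
      let lines := if pvTruthy (pvGet s "title") then lines ++ ["T1 " ++ (pvGet s "title").getD ""] else lines
      let lines :=
        if pvTruthy (pvGet s "authors") then
          (pvSplitComma ((pvGet s "authors").getD "")).foldl (fun lines author =>
            if pvTruthy (some (PySem.Str.strip author)) then lines ++ ["A1 " ++ PySem.Str.strip author] else lines) lines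
        else if pvTruthy (pvGet s "author") then lines ++ ["A1 " ++ (pvGet s "author").getD ""] else lines
      let lines := if pvTruthy (pvGet s "year") then lines ++ ["YR " ++ (pvGet s "year").getD ""] else lines
      let lines :=
        if pvTruthy (pvGet s "journal") || pvTruthy (pvGet s "venue") then
          lines ++ ["JF " ++ (if pvTruthy (pvGet s "journal") then pvGet s "journal" else pvGet s "venue").getD ""]
        else lines
      let lines := if pvTruthy (pvGet s "doi") then lines ++ ["DO " ++ (pvGet s "doi").getD ""] else lines
      let lines := if pvTruthy (pvGet s "url") then lines ++ ["UL " ++ (pvGet s "url").getD ""] else lines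
      let lines := if pvTruthy (pvGet s "abstract") then lines ++ ["AB " ++ PySem.Str.slice ((pvGet s "abstract").getD "") none (some 1000)] else lines
      let lines := if pvTruthy (pvGet s "volume") then lines ++ ["VO " ++ (pvGet s "volume").getD ""] else lines
      let lines := if pvTruthy (pvGet s "pages") then lines ++ ["SP " ++ (pvGet s "pages").getD ""] else lines
      lines ++ ["ER", ""]) acc) = acc ++ (sources.map pvALines).flatten := by
  induction sources generalizing acc with
  | nil => simp
  | cons s rest ih =>
    simp only [List.foldl_cons, List.map_cons, List.flatten_cons]
    rw [pvBody_eq acc s, ih, List.append_assoc]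

-- rendering a truthy-filtered singleton field
theorem pv_filter_single (t v : String) :
    (([(t, v)].filter (fun p => !(p.2 == ""))).map (fun p => p.1 ++ " " ++ p.2))
      = if !(v == "") then [t ++ " " ++ v] else [] := by
  by_cases h : v = "" <;> simp [h]

-- the JF candidate is truthy exactly when journal-or-venue is
theorem pv_jf_cond (j v : Option String) :
    (!((if pvTruthy j then j else v).getD "" == "")) = (pvTruthy j || pvTruthy v) := by
  by_cases h : pvTruthy j = true
  · simp [pvTruthy] at *
    simp [h]
  · simp [pvTruthy] at *
    simp [h]

-- abstract[:1000] is empty exactly when abstract is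
theorem pv_slice1000_empty (v : String) :
    (PySem.Str.slice v none (some 1000) == "") = (v == "") := by
  by_cases h : v = ""
  · subst h; decide
  · have hv : v.toList ≠ [] := by
      intro hc; exact h (String.toList_inj.1 (by simp [hc]))
    have hs : PySem.Str.slice v none (some 1000) ≠ "" := by
      intro hc
      have h2 := congrArg String.toList hc
      rw [PySem.Str.toList_slice, PySem.Chars.slice_eq_listSlice,
        PySem.List.slice_to v.toList (by norm_num)] at h2
      simp [List.take_eq_nil_iff, hv] at h2
    rw [beq_eq_false_iff_ne.2 hs, beq_eq_false_iff_ne.2 h]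

-- rendered tags
theorem pv_tag_T1 (v : String) : "T1" ++ " " ++ v = "T1 " ++ v := by simp
theorem pv_tag_A1 (v : String) : "A1" ++ " " ++ v = "A1 " ++ v := by simp
theorem pv_tag_YR (v : String) : "YR" ++ " " ++ v = "YR " ++ v := by simp
theorem pv_tag_JF (v : String) : "JF" ++ " " ++ v = "JF " ++ v := by simp
theorem pv_tag_DO (v : String) : "DO" ++ " " ++ v = "DO " ++ v := by simp
theorem pv_tag_UL (v : String) : "UL" ++ " " ++ v = "UL " ++ v := by simp
theorem pv_tag_AB (v : String) : "AB" ++ " " ++ v = "AB " ++ v := by simp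
theorem pv_tag_VO (v : String) : "VO" ++ " " ++ v = "VO " ++ v := by simp
theorem pv_tag_SP (v : String) : "SP" ++ " " ++ v = "SP " ++ v := by simp

-- A's per-record lines are B's record lines plus the blank separator line
theorem pvALines_eq (s : List (String × String)) : pvALines s = pvBLines s ++ [""] := by
  simp only [pvALines, pvBLines, pvFields, List.filter_append, List.map_append,
    pv_filter_single, apply_ite (List.filter (fun p : String × String => !(p.2 == ""))),
    apply_ite (List.map (fun p : String × String => p.1 ++ " " ++ p.2)),
    List.filter_map, List.map_map, Function.comp_def,
    pv_jf_cond, pv_slice1000_empty,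
    pv_tag_T1, pv_tag_A1, pv_tag_YR, pv_tag_JF, pv_tag_DO, pv_tag_UL, pv_tag_AB, pv_tag_VO, pv_tag_SP]
  simp [pvTruthy, List.append_assoc]

-- join lemmas (records are non-empty line lists)
theorem pvCJoin_append (sep : List Char) (xs ys : List (List Char))
    (hx : xs ≠ []) (hy : ys ≠ []) :
    PySem.Chars.join sep (xs ++ ys) = PySem.Chars.join sep xs ++ sep ++ PySem.Chars.join sep ys := by
  induction xs with
  | nil => exact absurd rfl hx
  | cons a xs ih =>
    cases xs with
    | nil =>
      cases ys with
      | nil => exact absurd rfl hy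
      | cons b t =>
        simp [PySem.Chars.join_cons_cons, PySem.Chars.join_singleton, List.append_assoc]
    | cons c xs' =>
      rw [List.cons_append, List.cons_append, PySem.Chars.join_cons_cons, ← List.cons_append,
        ih (by simp), PySem.Chars.join_cons_cons]
      simp [List.append_assoc]

-- joining all lines (each record's lines followed by a blank line) with "\n"
-- = joining the per-record "\n"-joins with "\n\n" and appending one "\n"
theorem pvCJoin_records (M : List (List (List Char))) (h : ∀ r ∈ M, r ≠ []) (hM : M ≠ []) :
    PySem.Chars.join ['\n'] ((M.map (· ++ [([] : List Char)])).flatten)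
      = PySem.Chars.join ['\n', '\n'] (M.map (PySem.Chars.join ['\n'])) ++ ['\n'] := by
  induction M with
  | nil => exact absurd rfl hM
  | cons r M' ih =>
    have hr : r ≠ [] := h r (by simp)
    cases M' with
    | nil =>
      simp only [List.map_cons, List.map_nil, List.flatten_cons, List.flatten_nil,
        List.append_nil, PySem.Chars.join_singleton]
      rw [pvCJoin_append ['\n'] r [[]] hr (by simp), PySem.Chars.join_singleton]
      simp
    | cons r2 M'' =>
      have hflat : ((r2 :: M'').map (· ++ [([] : List Char)])).flatten ≠ [] := by
        simp only [List.map_cons, List.flatten_cons]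
        intro hc
        have := (List.append_eq_nil_iff.1 hc).1
        simp at this
      have hsplit : (((r :: r2 :: M'').map (fun x => x ++ [([] : List Char)])).flatten)
          = (r ++ [([] : List Char)]) ++ ((r2 :: M'').map (fun x => x ++ [([] : List Char)])).flatten := by
        simp
      rw [show ((r :: r2 :: M'').map (· ++ [([] : List Char)])) = ((r :: r2 :: M'').map (fun x => x ++ [([] : List Char)])) from rfl,
        hsplit, pvCJoin_append ['\n'] _ _ (by simp) hflat,
        pvCJoin_append ['\n'] r [[]] hr (by simp), PySem.Chars.join_singleton,
        ih (fun x hx => h x (by simp [hx])) (by simp)]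
      simp [List.map_cons, PySem.Chars.join_cons_cons, List.append_assoc]

theorem pvBLines_ne_nil (s : List (String × String)) : pvBLines s ≠ [] := by
  simp [pvBLines]

-- ===== VERDICT (by name: the statement is the Claim_ definition above) =====
theorem format_refworks_export_spec : Claim_equal_format_refworks_export := by
  intro sources _
  show format_refworks_export sources = format_refworks_export_alt sources
  unfold format_refworks_export format_refworks_export_alt
  rw [pvLines_eq sources []]
  simp only [List.nil_append]
  cases sources with
  | nil => decide
  | cons s rest =>
    simp only [List.isEmpty_cons, Bool.false_eq_true, if_false]
    apply String.toList_inj.1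
    simp only [String.toList_append, PySem.Str.toList_join, List.map_flatten,
      List.map_map, Function.comp_def, pvALines_eq, List.map_append, List.map_cons,
      List.map_nil]
    have hrec : ∀ t : List (String × String),
        (pvRecord t).toList = PySem.Chars.join ['\n'] ((pvBLines t).map String.toList) := by
      intro t
      rw [show pvRecord t = PySem.Str.join "\n" (pvBLines t) from rfl, PySem.Str.toList_join]
      rfl
    have hM : ∀ r ∈ (s :: rest).map (fun t => (pvBLines t).map String.toList), r ≠ [] := by
      intro r hr
      obtain ⟨t, _, rfl⟩ := List.mem_map.1 hr
      simpa using pvBLines_ne_nil t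
    have hkey := pvCJoin_records ((s :: rest).map (fun t => (pvBLines t).map String.toList))
      hM (by simp)
    simp only [List.map_map, Function.comp_def] at hkey
    rw [show ("\n".toList) = ['\n'] from rfl, show ("\n\n".toList) = ['\n', '\n'] from rfl,
      show ("".toList) = ([] : List Char) from rfl]
    simpa [hrec] using hkey
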